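-- pv_equiv track=rewrite | github.com/deepspraj/CodeVita-Exam | Hospital_Revenue/Hospital_revenue.py | price_calculator
-- ===== SOURCE A (Python) =====
-- def price_calculator(rooms, count_of_month, no_of_days):
--     patients = 0
--     for i in range(1, no_of_days + 1):
--         patients_on_day = (6 - count_of_month) ** 2 + abs(i - 15)
--         if patients_on_day >= rooms:
--             patients_on_day = rooms
--         patients = patients + patients_on_day
--     return patients
-- ===== SOURCE B (Python) =====
-- def price_calculator(rooms, count_of_month, no_of_days):
--     # Closed-form O(1): total = sum over days of min(k + |i - 15|, rooms).
--     k = (6 - count_of_month) ** 2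
--
--     def f(m):
--         # sum_{j=1..m} min(k + j, rooms) for m >= 0, in closed form
--         u = min(max(rooms - k - 1, 0), m)
--         return u * k + u * (u + 1) // 2 + (m - u) * rooms
--
--     n = max(no_of_days, 0)
--     total = f(14) - f(14 - min(n, 14))
--     if n >= 15:
--         total += min(k, rooms)
--     if n > 15:
--         total += f(n - 15)
--     return total
-- ===== Notes on version B (the rewrite author's own statement) =====
-- stated objective: faster
-- what changed: Replaced the per-day loop with an O(1) closed-form arithmetic-series sum: the capped daily count min((6-count_of_month)^2+|i-15|, rooms) is summed in closed form by splitting the days at i=15 and counting how many days stay below the cap.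
import Mathlib
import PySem

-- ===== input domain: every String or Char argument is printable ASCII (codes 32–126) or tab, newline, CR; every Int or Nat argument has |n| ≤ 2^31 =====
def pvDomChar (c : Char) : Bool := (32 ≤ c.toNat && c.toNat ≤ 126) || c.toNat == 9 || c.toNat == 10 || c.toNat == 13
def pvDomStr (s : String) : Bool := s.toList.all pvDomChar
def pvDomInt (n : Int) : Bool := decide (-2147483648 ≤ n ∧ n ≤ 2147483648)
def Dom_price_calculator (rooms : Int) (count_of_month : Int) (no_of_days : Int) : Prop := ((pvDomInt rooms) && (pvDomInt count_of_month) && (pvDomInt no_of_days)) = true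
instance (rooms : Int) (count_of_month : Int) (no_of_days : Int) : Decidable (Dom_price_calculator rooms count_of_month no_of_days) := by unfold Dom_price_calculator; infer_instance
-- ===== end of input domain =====

-- B replaces A's day-by-day loop by an O(1) closed-form arithmetic-series sum with a cap threshold.

-- ===== PORT A =====
def price_calculator (rooms : Int) (count_of_month : Int) (no_of_days : Int) : Int :=
  (PySem.List.pyRange 1 (no_of_days + 1) 1).foldl
    (fun patients i =>
      let patients_on_day := (6 - count_of_month) ^ 2 + |i - 15|
      let patients_on_day := if patients_on_day ≥ rooms then rooms else patients_on_day
      patients + patients_on_day) 0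

-- ===== PORT B =====
-- sum_{j=1..m} min (k + j) rooms, for m ≥ 0 (closed form; u = number of uncapped days)
def pvF (rooms : Int) (k : Int) (m : Int) : Int :=
  let u := min (max (rooms - k - 1) 0) m
  u * k + PySem.Int.floordiv (u * (u + 1)) 2 + (m - u) * rooms

def price_calculator_alt (rooms : Int) (count_of_month : Int) (no_of_days : Int) : Int :=
  let k := (6 - count_of_month) ^ 2
  let n := max no_of_days 0
  let total := pvF rooms k 14 - pvF rooms k (14 - min n 14)
  let total := if 15 ≤ n then total + min k rooms else total
  if 15 < n then total + pvF rooms k (n - 15) else total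

-- ===== PRECONDITION & SPEC =====
def Spec_price_calculator (rooms : Int) (count_of_month : Int) (no_of_days : Int) (out : Int) : Prop := out = price_calculator_alt rooms count_of_month no_of_days
instance (rooms : Int) (count_of_month : Int) (no_of_days : Int) (out : Int) : Decidable (Spec_price_calculator rooms count_of_month no_of_days out) := by unfold Spec_price_calculator; infer_instance

-- ===== CLAIM (what is proved, stated in full; the proofs are below) =====
def Claim_equal_price_calculator : Prop := ∀ (rooms : Int) (count_of_month : Int) (no_of_days : Int), Dom_price_calculator rooms count_of_month no_of_days → Spec_price_calculator rooms count_of_month no_of_days (price_calculator rooms count_of_month no_of_days)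

-- ===== LEMMAS AND PROOFS =====

lemma pvF_zero (rooms k : Int) : pvF rooms k 0 = 0 := by
  have h0 : min (max (rooms - k - 1) 0) 0 = 0 := by omega
  simp only [pvF, h0]
  have : PySem.Int.floordiv ((0:Int) * (0 + 1)) 2 = 0 := by decide
  rw [this]; ring

lemma floordiv_two_double (q : Int) : PySem.Int.floordiv (2 * q) 2 = q := by
  rw [PySem.Int.floordiv_eq_ediv_of_pos (by norm_num)]
  exact Int.mul_ediv_cancel_left _ (by norm_num)

lemma pvF_succ (rooms k m : Int) (hm : 0 ≤ m) :
    pvF rooms k (m + 1) = pvF rooms k m + min (k + m + 1) rooms := by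
  by_cases hT : rooms - k - 1 ≤ 0
  · have h0 : min (max (rooms - k - 1) 0) m = 0 := by omega
    have h1 : min (max (rooms - k - 1) 0) (m + 1) = 0 := by omega
    have h2 : min (k + m + 1) rooms = rooms := by omega
    simp only [pvF, h0, h1, h2]
    have : PySem.Int.floordiv ((0:Int) * (0 + 1)) 2 = 0 := by decide
    rw [this]; ring
  · by_cases hm1 : m + 1 ≤ rooms - k - 1
    · have h0 : min (max (rooms - k - 1) 0) m = m := by omega
      have h1 : min (max (rooms - k - 1) 0) (m + 1) = m + 1 := by omega
      have h2 : min (k + m + 1) rooms = k + m + 1 := by omega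
      obtain ⟨q, hq⟩ := Int.even_mul_succ_self m
      have e1 : m * (m + 1) = 2 * q := by linarith
      have e2 : (m + 1) * (m + 1 + 1) = 2 * (q + (m + 1)) := by linear_combination hq
      simp only [pvF, h0, h1, h2, e1, e2, floordiv_two_double]
      ring
    · have h0 : min (max (rooms - k - 1) 0) m = rooms - k - 1 := by omega
      have h1 : min (max (rooms - k - 1) 0) (m + 1) = rooms - k - 1 := by omega
      have h2 : min (k + m + 1) rooms = rooms := by omega
      simp only [pvF, h0, h1, h2]
      ring

lemma alt_nonpos (rooms c n : Int) (hn : n ≤ 0) : price_calculator_alt rooms c n = 0 := by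
  have h0 : max n 0 = 0 := by omega
  simp only [price_calculator_alt, h0]
  norm_num

lemma alt_step (rooms c n : Int) (hn : 1 ≤ n) :
    price_calculator_alt rooms c n
      = price_calculator_alt rooms c (n - 1) + min ((6 - c) ^ 2 + |n - 15|) rooms := by
  set k := (6 - c) ^ 2 with hk
  have hmaxn : max n 0 = n := by omega
  have hmaxn' : max (n - 1) 0 = n - 1 := by omega
  rcases le_or_gt n 14 with h14 | h14
  · -- n ≤ 14
    have ha : min n 14 = n := by omega
    have hb : min (n - 1) 14 = n - 1 := by omega
    have habs : |n - 15| = 15 - n := by rw [abs_of_nonpos (by omega)]; ring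
    have hstep := pvF_succ rooms k (14 - n) (by omega)
    simp only [price_calculator_alt, hmaxn, hmaxn', ha, hb, habs, ← hk]
    rw [if_neg (by omega), if_neg (by omega), if_neg (by omega), if_neg (by omega)]
    have : (14 : Int) - (n - 1) = (14 - n) + 1 := by ring
    rw [this, hstep]
    have : k + (14 - n) + 1 = k + (15 - n) := by ring
    rw [this]; ring
  · rcases le_or_gt n 15 with h15 | h15
    · -- n = 15
      have hn15 : n = 15 := by omega
      subst hn15
      have habs : |(15 : Int) - 15| = 0 := by norm_num
      simp only [price_calculator_alt, hmaxn, hmaxn', habs, ← hk]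
      norm_num
    · rcases le_or_gt n 16 with h16 | h16
      · -- n = 16
        have hn16 : n = 16 := by omega
        subst hn16
        have habs : |(16 : Int) - 15| = 1 := by norm_num
        have h1 : pvF rooms k 1 = min (k + 1) rooms := by
          have := pvF_succ rooms k 0 le_rfl
          rw [pvF_zero] at this
          simpa using this
        simp only [price_calculator_alt, hmaxn, hmaxn', habs, ← hk]
        norm_num [h1]
      · -- n ≥ 17
        have ha : min n 14 = 14 := by omega
        have hb : min (n - 1) 14 = 14 := by omega
        have habs : |n - 15| = n - 15 := by rw [abs_of_nonneg (by omega)]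
        have hstep := pvF_succ rooms k (n - 16) (by omega)
        simp only [price_calculator_alt, hmaxn, hmaxn', ha, hb, habs, ← hk]
        rw [if_pos (by omega), if_pos (by omega), if_pos (by omega), if_pos (by omega)]
        have e1 : n - 15 = (n - 16) + 1 := by ring
        rw [e1, hstep]
        have e2 : k + (n - 16) + 1 = k + ((n - 16) + 1) := by ring
        rw [e2]; ring_nf

lemma foldA_eq (rooms c : Int) (N : Nat) :
    price_calculator rooms c (N : Int) = price_calculator_alt rooms c (N : Int) := by
  induction N with
  | zero =>
      simp only [price_calculator, Nat.cast_zero, zero_add]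
      rw [PySem.List.pyRange_one_eq_nil le_rfl, List.foldl_nil, alt_nonpos rooms c 0 le_rfl]
  | succ N ih =>
      have hb : (1 : Int) ≤ (N : Int) + 1 := by omega
      have hcast : ((N + 1 : Nat) : Int) = (N : Int) + 1 := by push_cast; ring
      simp only [price_calculator, hcast] at ih ⊢
      rw [PySem.List.pyRange_one_succ_right hb, List.foldl_append, List.foldl_cons,
        List.foldl_nil]
      rw [alt_step rooms c ((N : Int) + 1) (by omega)]
      simp only [show (N : Int) + 1 - 1 = (N : Int) by ring]
      rw [← ih]
      have hmin : (if (6 - c) ^ 2 + |(N : Int) + 1 - 15| ≥ rooms then rooms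
          else (6 - c) ^ 2 + |(N : Int) + 1 - 15|)
          = min ((6 - c) ^ 2 + |(N : Int) + 1 - 15|) rooms := by
        rw [min_def]; split_ifs <;> omega
      simp only [hmin]

-- ===== VERDICT (by name: the statement is the Claim_ definition above) =====
theorem price_calculator_spec : Claim_equal_price_calculator := by
  intro rooms c n _
  unfold Spec_price_calculator
  rcases le_or_gt n 0 with hn | hn
  · rw [alt_nonpos rooms c n hn]
    simp only [price_calculator]
    rw [PySem.List.pyRange_one_eq_nil (by omega), List.foldl_nil]
  · have : n = ((n.toNat : Nat) : Int) := by omega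
    rw [this]
    exact foldA_eq rooms c n.toNat
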